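-- pv_equiv track=rewrite | github.com/AznIronMan/VideoScanner | sqlite.py | substitute_characters
-- ===== SOURCE A (Python) =====
-- from typing import (
--     Dict,
--     List,
--     Optional,
--     Sequence,
--     TypeAlias,
--     Union,
-- )
--
-- def substitute_characters(original_str: str) -> str:
--     subs: Dict[str, str] = {
--         "[": "⟦",
--         "]": "⟧",
--         "{": "⦃",
--         "}": "⦄",
--         "(": "❨",
--         ")": "❩",
--         ",": "‚",
--         ";": "⁏",
--         "<": "❮",
--         ">": "❯",
--     }
--     formatted_str = original_str
--     for char, sub in subs.items():
--         formatted_str = formatted_str.replace(char, sub)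
--     return formatted_str
-- ===== SOURCE B (Python) =====
-- def substitute_characters(original_str: str) -> str:
--     subs = {
--         "[": "\u27e6",
--         "]": "\u27e7",
--         "{": "\u2983",
--         "}": "\u2984",
--         "(": "\u2768",
--         ")": "\u2769",
--         ",": "\u201a",
--         ";": "\u204f",
--         "<": "\u276e",
--         ">": "\u276f",
--     }
--     table = str.maketrans(subs)
--     return original_str.translate(table)
-- ===== Notes on version B (the rewrite author's own statement) =====
-- stated objective: idiomatic
-- what changed: Replaced ten sequential str.replace scans (each rebuilding the whole string) by one translation table built once with str.maketrans and a single str.translate pass over the string.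
import Mathlib
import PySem

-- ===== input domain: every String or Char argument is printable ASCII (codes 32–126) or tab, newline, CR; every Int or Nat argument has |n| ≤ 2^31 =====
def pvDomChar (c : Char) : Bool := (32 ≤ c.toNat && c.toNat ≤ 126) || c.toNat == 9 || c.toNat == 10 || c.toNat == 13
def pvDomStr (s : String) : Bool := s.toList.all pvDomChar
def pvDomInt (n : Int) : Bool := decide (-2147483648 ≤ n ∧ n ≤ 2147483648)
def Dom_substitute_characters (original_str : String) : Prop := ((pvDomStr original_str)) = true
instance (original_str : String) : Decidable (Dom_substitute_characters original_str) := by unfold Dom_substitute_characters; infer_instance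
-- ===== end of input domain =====

-- B replaces A's ten sequential .replace scans with a single table-driven pass (str.maketrans/translate); objective: idiomatic single-pass rewrite, same mappings.
-- ===== PORT A =====
def substitute_characters (original_str : String) : String :=
  let subs : List (String × String) :=
    [("[","⟦"),("]","⟧"),("{","⦃"),("}","⦄"),("(","❨"),(")","❩"),(",","‚"),(";","⁏"),("<","❮"),(">","❯")]
  subs.foldl (fun formatted_str p => PySem.Str.replace formatted_str p.1 p.2) original_str

-- ===== PORT B =====
-- the translation table built once by str.maketrans(subs): one char-to-char lookup
def subChar (c : Char) : Char :=
  if c = '[' then '⟦' else if c = ']' then '⟧' else if c = '{' then '⦃' else if c = '}' then '⦄'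
  else if c = '(' then '❨' else if c = ')' then '❩' else if c = ',' then '‚' else if c = ';' then '⁏'
  else if c = '<' then '❮' else if c = '>' then '❯' else c

-- str.translate: one pass over the string through the table
def substitute_characters_alt (original_str : String) : String :=
  String.ofList (original_str.toList.map subChar)

-- ===== PRECONDITION & SPEC =====
def Spec_substitute_characters (original_str : String) (out : String) : Prop := out = substitute_characters_alt original_str
instance (original_str : String) (out : String) : Decidable (Spec_substitute_characters original_str out) := by unfold Spec_substitute_characters; infer_instance

-- ===== CLAIM (what is proved, stated in full; the proofs are below) =====
def Claim_equal_substitute_characters : Prop := ∀ (original_str : String), Dom_substitute_characters original_str → Spec_substitute_characters original_str (substitute_characters original_str)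

-- ===== LEMMAS AND PROOFS =====
lemma go1 (k r : Char) : ∀ (l : List Char) (fuel : Nat) (acc : List Char), l.length ≤ fuel →
    PySem.Chars.replace.go [k] [r] fuel l acc = acc.reverse ++ l.map (fun x => if x = k then r else x) := by
  intro l
  induction l with
  | nil => intro fuel acc h; cases fuel <;> simp [PySem.Chars.replace.go]
  | cons x t ih =>
    intro fuel acc h
    simp only [List.length_cons] at h
    cases fuel with
    | zero => omega
    | succ n =>
      simp only [PySem.Chars.replace.go]
      by_cases hx : x = k
      · subst hx
        rw [show ([x].isPrefixOf (x :: t)) = true from by simp [List.isPrefixOf]]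
        simp only [if_true, List.length_cons, List.length_nil, List.drop_succ_cons, List.drop_zero, List.reverse_cons, List.reverse_nil, List.nil_append]
        rw [ih n ([r] ++ acc) (by omega)]
        simp
      · rw [show ([k].isPrefixOf (x :: t)) = (false : Bool) from by simp [List.isPrefixOf]; exact fun h => absurd h.symm hx]
        simp only [Bool.false_eq_true, reduceIte]
        rw [ih n (x :: acc) (by omega)]
        simp [hx]

lemma replace1 (k r : Char) (l : List Char) :
    PySem.Chars.replace l [k] [r] = l.map (fun x => if x = k then r else x) := by
  rw [PySem.Chars.replace]
  simp [go1 k r l l.length [] le_rfl]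

lemma tl1 : ("[" : String).toList = ['['] := rfl
lemma tl2 : ("⟦" : String).toList = ['⟦'] := rfl
lemma tl3 : ("]" : String).toList = [']'] := rfl
lemma tl4 : ("⟧" : String).toList = ['⟧'] := rfl
lemma tl5 : ("{" : String).toList = ['{'] := rfl
lemma tl6 : ("⦃" : String).toList = ['⦃'] := rfl
lemma tl7 : ("}" : String).toList = ['}'] := rfl
lemma tl8 : ("⦄" : String).toList = ['⦄'] := rfl
lemma tl9 : ("(" : String).toList = ['('] := rfl
lemma tl10 : ("❨" : String).toList = ['❨'] := rfl
lemma tl11 : (")" : String).toList = [')'] := rfl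
lemma tl12 : ("❩" : String).toList = ['❩'] := rfl
lemma tl13 : ("," : String).toList = [','] := rfl
lemma tl14 : ("‚" : String).toList = ['‚'] := rfl
lemma tl15 : (";" : String).toList = [';'] := rfl
lemma tl16 : ("⁏" : String).toList = ['⁏'] := rfl
lemma tl17 : ("<" : String).toList = ['<'] := rfl
lemma tl18 : ("❮" : String).toList = ['❮'] := rfl
lemma tl19 : (">" : String).toList = ['>'] := rfl
lemma tl20 : ("❯" : String).toList = ['❯'] := rfl


lemma subst_eq (s : String) : substitute_characters s = substitute_characters_alt s := by
  show _ = String.ofList (s.toList.map subChar)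
  have h : (substitute_characters s).toList = s.toList.map subChar := by
    simp only [substitute_characters, List.foldl, PySem.Str.toList_replace]
    simp only [tl1, tl2, tl3, tl4, tl5, tl6, tl7, tl8, tl9, tl10, tl11, tl12, tl13, tl14, tl15, tl16, tl17, tl18, tl19, tl20]
    simp only [replace1, List.map_map]
    apply List.map_congr_left
    intro c _

    by_cases h1 : c = '['
    · subst h1; decide
    by_cases h2 : c = ']'
    · subst h2; decide
    by_cases h3 : c = '{'
    · subst h3; decide
    by_cases h4 : c = '}'
    · subst h4; decide
    by_cases h5 : c = '('
    · subst h5; decide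
    by_cases h6 : c = ')'
    · subst h6; decide
    by_cases h7 : c = ','
    · subst h7; decide
    by_cases h8 : c = ';'
    · subst h8; decide
    by_cases h9 : c = '<'
    · subst h9; decide
    by_cases h10 : c = '>'
    · subst h10; decide
    simp [subChar, h1, h2, h3, h4, h5, h6, h7, h8, h9, h10]
  calc substitute_characters s = String.ofList (substitute_characters s).toList := by simp
    _ = String.ofList (List.map subChar s.toList) := by rw [h]

-- ===== VERDICT (by name: the statement is the Claim_ definition above) =====
theorem substitute_characters_spec : Claim_equal_substitute_characters := by
  intro s _
  exact subst_eq s
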